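-- pv_equiv track=rewrite | github.com/kunin-tc/ihsdadam | src/ihsdadam/tabs/eval_years_tab.py | _format_years
-- ===== SOURCE A (Python) =====
-- from typing import Dict, List, Tuple
--
-- def _format_years(years: List[str]) -> str:
--     """Format a sorted list of year strings as a compact range or CSV.
--
--     Consecutive runs collapse to "YYYY-YYYY"; gaps produce comma-separated
--     values.
--     """
--     if not years:
--         return ""
--     if len(years) == 1:
--         return years[0]
--
--     int_years = [int(y) for y in years]
--     # Check if the sequence is fully consecutive
--     if int_years[-1] - int_years[0] + 1 == len(int_years):
--         return f"{years[0]}-{years[-1]}"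
--
--     # Build mixed range/single representation
--     parts: List[str] = []
--     run_start = int_years[0]
--     prev = int_years[0]
--     for y in int_years[1:]:
--         if y == prev + 1:
--             prev = y
--         else:
--             parts.append(
--                 str(run_start) if run_start == prev
--                 else f"{run_start}-{prev}"
--             )
--             run_start = y
--             prev = y
--     parts.append(
--         str(run_start) if run_start == prev
--         else f"{run_start}-{prev}"
--     )
--     return ", ".join(parts)
-- ===== SOURCE B (Python) =====
-- from typing import List
--
--
-- def _format_years(years: List[str]) -> str:
--     """Format a sorted list of year strings as a compact range or CSV.
--
--     Recursive divide-and-format: split off the longest consecutive prefix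
--     run, format it, and recurse on the remainder, concatenating strings
--     directly (no parts list, no accumulator state machine).
--     """
--     if not years:
--         return ""
--     if len(years) == 1:
--         return years[0]
--
--     int_years = [int(y) for y in years]
--     if int_years[-1] - int_years[0] + 1 == len(int_years):
--         return f"{years[0]}-{years[-1]}"
--
--     return _fmt(int_years)
--
--
-- def _split_run(iy: List[int]) -> tuple:
--     """Longest consecutive prefix of iy, and the remainder."""
--     if len(iy) >= 2 and iy[1] == iy[0] + 1:
--         run, rest = _split_run(iy[1:])
--         return [iy[0]] + run, rest
--     return [iy[0]], iy[1:]
--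
--
-- def _fmt(iy: List[int]) -> str:
--     run, rest = _split_run(iy)
--     head = str(run[0]) if len(run) == 1 else f"{run[0]}-{run[-1]}"
--     return head if not rest else head + ", " + _fmt(rest)
-- ===== Notes on version B (the rewrite author's own statement) =====
-- stated objective: alternative
-- what changed: Replaces A's fused accumulator state machine (run_start/prev plus a parts list joined at the end) with structural recursion: split off the longest consecutive prefix run, format it, and recurse on the remainder, concatenating the result string directly.
import Mathlib
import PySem

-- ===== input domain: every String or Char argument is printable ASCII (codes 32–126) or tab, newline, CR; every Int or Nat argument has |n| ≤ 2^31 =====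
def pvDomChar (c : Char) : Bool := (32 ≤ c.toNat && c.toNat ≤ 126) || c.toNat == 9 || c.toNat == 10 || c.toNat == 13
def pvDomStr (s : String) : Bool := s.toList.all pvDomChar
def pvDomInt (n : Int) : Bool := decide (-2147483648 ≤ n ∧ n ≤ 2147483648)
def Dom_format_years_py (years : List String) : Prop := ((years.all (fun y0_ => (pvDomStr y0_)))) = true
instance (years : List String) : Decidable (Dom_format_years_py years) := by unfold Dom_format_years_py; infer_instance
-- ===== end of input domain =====

-- B: recursive split-off-first-run-and-concatenate instead of A's fused accumulator state
-- machine with a parts list (objective: alternative decomposition, same return value).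

-- formatting of one run: `str(a) if a == b else f"{a}-{b}"` (shared shape of both Pythons' f-strings)
def pvFmtRun (a b : Int) : String :=
  if a = b then PySem.Int.toStr a
  else PySem.Str.join "-" [PySem.Int.toStr a, PySem.Int.toStr b]

-- ===== PORT A =====
def format_years_py (years : List String) : String :=
  match years with
  | [] => ""
  | y0 :: rest =>
    if rest = [] then y0
    else
      let intYears := (y0 :: rest).map (fun y => (PySem.Int.ofStr? y).getD 0)
      if PySem.List.pyGetD intYears (-1) 0 - PySem.List.pyGetD intYears 0 0 + 1
          = (intYears.length : Int) then
        PySem.Str.join "-" [PySem.List.pyGetD (y0 :: rest) 0 "",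
                            PySem.List.pyGetD (y0 :: rest) (-1) ""]
      else
        let s0 := PySem.List.pyGetD intYears 0 0
        let r := intYears.tail.foldl
          (fun (st : List String × Int × Int) y =>
            if y = st.2.2 + 1 then (st.1, st.2.1, y)
            else (st.1 ++ [pvFmtRun st.2.1 st.2.2], y, y))
          ([], s0, s0)
        PySem.Str.join ", " (r.1 ++ [pvFmtRun r.2.1 r.2.2])

-- ===== PORT B =====
-- Python's str `+` is exactly list-of-chars append (port by hand; exact on all strings)
def pvStrCat (a b : String) : String := String.ofList (a.toList ++ b.toList)

-- `_split_run`: longest consecutive prefix and the remainder (structural recursion, as in Source B)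
def pvSplitRun : List Int → List Int × List Int
  | [] => ([], [])          -- unreachable in B (always called on a nonempty list)
  | [x] => ([x], [])
  | x :: y :: rest =>
    if y = x + 1 then
      ((x :: (pvSplitRun (y :: rest)).1), (pvSplitRun (y :: rest)).2)
    else ([x], y :: rest)

-- the split is a decomposition of the list (used for termination of pvFmt)
theorem pvSplitRun_append : ∀ (l : List Int), (pvSplitRun l).1 ++ (pvSplitRun l).2 = l := by
  intro l
  match l with
  | [] => rfl
  | [x] => rfl
  | x :: y :: rest =>
    by_cases h : y = x + 1
    · simp only [pvSplitRun, if_pos h, List.cons_append, List.cons.injEq, true_and]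
      exact pvSplitRun_append (y :: rest)
    · simp [pvSplitRun, if_neg h]

theorem pvSplitRun_fst_cons (x : Int) (xs : List Int) :
    ∃ t, (pvSplitRun (x :: xs)).1 = x :: t := by
  match xs with
  | [] => exact ⟨[], rfl⟩
  | y :: rest =>
    by_cases h : y = x + 1
    · exact ⟨(pvSplitRun (y :: rest)).1, by simp [pvSplitRun, if_pos h]⟩
    · exact ⟨[], by simp [pvSplitRun, if_neg h]⟩

theorem pvSplitRun_snd_lt (iy : List Int) (h : (pvSplitRun iy).2 ≠ []) :
    (pvSplitRun iy).2.length < iy.length := by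
  match iy with
  | [] => exact absurd rfl h
  | x :: xs =>
    obtain ⟨t, ht⟩ := pvSplitRun_fst_cons x xs
    have := pvSplitRun_append (x :: xs)
    have hlen : (pvSplitRun (x :: xs)).1.length + (pvSplitRun (x :: xs)).2.length
        = (x :: xs).length := by
      rw [← List.length_append, this]
    rw [ht] at hlen
    simp only [List.length_cons] at hlen ⊢
    omega

-- `_fmt`: format the first run, recurse on the remainder
def pvFmt (iy : List Int) : String :=
  let pr := pvSplitRun iy
  let head := if pr.1.length = 1 then PySem.Int.toStr (PySem.List.pyGetD pr.1 0 0)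
              else PySem.Str.join "-" [PySem.Int.toStr (PySem.List.pyGetD pr.1 0 0),
                                       PySem.Int.toStr (PySem.List.pyGetD pr.1 (-1) 0)]
  if hr : pr.2 = [] then head
  else pvStrCat (pvStrCat head ", ") (pvFmt pr.2)
termination_by iy.length
decreasing_by exact pvSplitRun_snd_lt iy hr

def format_years_py_alt (years : List String) : String :=
  match years with
  | [] => ""
  | y0 :: rest =>
    if rest = [] then y0
    else
      let intYears := (y0 :: rest).map (fun y => (PySem.Int.ofStr? y).getD 0)
      if PySem.List.pyGetD intYears (-1) 0 - PySem.List.pyGetD intYears 0 0 + 1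
          = (intYears.length : Int) then
        PySem.Str.join "-" [PySem.List.pyGetD (y0 :: rest) 0 "",
                            PySem.List.pyGetD (y0 :: rest) (-1) ""]
      else
        pvFmt intYears

-- ===== PRECONDITION & SPEC =====
-- Pre_ excludes exactly the inputs where `int(y)` raises ValueError in A (len ≥ 2 with a non-int-like string).
def Pre_format_years_py (years : List String) : Prop :=
  years.length ≤ 1 ∨ (years.all (fun y => (PySem.Int.ofStr? y).isSome)) = true
instance (years : List String) : Decidable (Pre_format_years_py years) := by
  unfold Pre_format_years_py; infer_instance

def pvWitness_format_years_py : List String := ["1999", "2001", "2002"]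

def Spec_format_years_py (years : List String) (out : String) : Prop := out = format_years_py_alt years
instance (years : List String) (out : String) : Decidable (Spec_format_years_py years out) := by unfold Spec_format_years_py; infer_instance

-- ===== CLAIM (what is proved, stated in full; the proofs are below) =====
def Claim_equal_format_years_py : Prop := ∀ (years : List String), Dom_format_years_py years → Pre_format_years_py years → Spec_format_years_py years (format_years_py years)

-- ===== LEMMAS AND PROOFS =====

-- the list of consecutive runs of l, continuing an open run (a, b)
def pvRunsFrom (a b : Int) : List Int → List (Int × Int)
  | [] => [(a, b)]
  | y :: ys => if y = b + 1 then pvRunsFrom a y ys else (a, b) :: pvRunsFrom y y ys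

-- the runs of a whole list
def pvRuns : List Int → List (Int × Int)
  | [] => []
  | v :: r => pvRunsFrom v v r

-- A's fused loop produces exactly the formatted runs
lemma pv_loopA (l : List Int) (parts : List String) (a b : Int) :
    (let r := l.foldl
        (fun (st : List String × Int × Int) y =>
          if y = st.2.2 + 1 then (st.1, st.2.1, y)
          else (st.1 ++ [pvFmtRun st.2.1 st.2.2], y, y))
        (parts, a, b)
     r.1 ++ [pvFmtRun r.2.1 r.2.2])
    = parts ++ (pvRunsFrom a b l).map (fun p => pvFmtRun p.1 p.2) := by
  induction l generalizing parts a b with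
  | nil => simp [pvRunsFrom]
  | cons y ys ih =>
    simp only [List.foldl_cons, pvRunsFrom]
    by_cases h : y = b + 1
    · simp only [h]
      exact ih parts a (b + 1)
    · simp only [if_neg h]
      rw [ih (parts ++ [pvFmtRun a b]) y y]
      simp

-- the run split off from b :: xs ends at b + (its length) - 1
lemma pv_split_last : ∀ (xs : List Int) (b : Int),
    (pvSplitRun (b :: xs)).1.getLastD 0
      = b + ((pvSplitRun (b :: xs)).1.length : Int) - 1 := by
  intro xs
  induction xs with
  | nil => intro b; simp [pvSplitRun]
  | cons y ys ih =>
    intro b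
    by_cases h : y = b + 1
    · obtain ⟨t, ht⟩ := pvSplitRun_fst_cons y ys
      have h2 := ih y
      rw [ht] at h2
      simp only [pvSplitRun, if_pos h, ht, List.getLastD_cons, List.length_cons] at h2 ⊢
      push_cast at h2 ⊢
      omega
    · simp [pvSplitRun, if_neg h]

-- the split decomposes the runs: the first run, then the runs of the remainder
lemma pv_split_runs : ∀ (xs : List Int) (a b : Int),
    pvRunsFrom a b xs
      = (a, (pvSplitRun (b :: xs)).1.getLastD 0) :: pvRuns ((pvSplitRun (b :: xs)).2) := by
  intro xs
  induction xs with
  | nil => intro a b; simp [pvRunsFrom, pvSplitRun, pvRuns]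
  | cons y ys ih =>
    intro a b
    by_cases h : y = b + 1
    · obtain ⟨t, ht⟩ := pvSplitRun_fst_cons y ys
      have := ih a y
      simp only [pvRunsFrom, if_pos h, pvSplitRun, ht] at this ⊢
      rw [h] at this ⊢
      simpa [ht] using this
    · simp [pvRunsFrom, if_neg h, pvSplitRun, pvRuns]

-- String-level join lemmas
lemma pv_join_singleton (x : String) : PySem.Str.join ", " [x] = x := by
  simp [PySem.Str.join, PySem.Chars.join_singleton]

lemma pv_join_cons_cons (x y : String) (rest : List String) :
    PySem.Str.join ", " (x :: y :: rest)
      = pvStrCat (pvStrCat x ", ") (PySem.Str.join ", " (y :: rest)) := by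
  simp [PySem.Str.join, pvStrCat, PySem.Chars.join_cons_cons]

-- runs are never empty
lemma pvRunsFrom_ne_nil (l : List Int) (a b : Int) : pvRunsFrom a b l ≠ [] := by
  induction l generalizing a b with
  | nil => simp [pvRunsFrom]
  | cons y ys ih =>
    simp only [pvRunsFrom]
    by_cases h : y = b + 1
    · simp only [if_pos h]; exact ih a y
    · simp [if_neg h]

-- B's recursive formatter computes the joined formatted runs
lemma pv_fmt_spec : ∀ (n : Nat) (l : List Int), l ≠ [] → l.length ≤ n →
    pvFmt l = PySem.Str.join ", " ((pvRuns l).map (fun p => pvFmtRun p.1 p.2)) := by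
  intro n
  induction n with
  | zero => intro l hl hn; cases l with
    | nil => exact absurd rfl hl
    | cons v xs => simp at hn
  | succ n ih =>
    intro l hl hn
    cases l with
    | nil => exact absurd rfl hl
    | cons v xs =>
      obtain ⟨t, ht⟩ := pvSplitRun_fst_cons v xs
      have hruns := pv_split_runs xs v v
      have hlast := pv_split_last xs v
      rw [pvFmt]
      have hhead :
          (if (pvSplitRun (v :: xs)).1.length = 1 then
              PySem.Int.toStr (PySem.List.pyGetD (pvSplitRun (v :: xs)).1 0 0)
            else PySem.Str.join "-"
              [PySem.Int.toStr (PySem.List.pyGetD (pvSplitRun (v :: xs)).1 0 0),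
               PySem.Int.toStr (PySem.List.pyGetD (pvSplitRun (v :: xs)).1 (-1) 0)])
          = pvFmtRun v ((pvSplitRun (v :: xs)).1.getLastD 0) := by
        have hne : (pvSplitRun (v :: xs)).1 ≠ [] := by rw [ht]; simp
        have h0 : PySem.List.pyGetD (pvSplitRun (v :: xs)).1 0 0 = v := by
          rw [ht, PySem.List.pyGetD_zero_cons]
        have hm1 : PySem.List.pyGetD (pvSplitRun (v :: xs)).1 (-1) 0
            = (pvSplitRun (v :: xs)).1.getLastD 0 := by
          rw [PySem.List.pyGetD_neg_one _ _ hne, List.getLastD_eq_getLast?,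
            List.getLast?_eq_some_getLast hne]
          simp
        have hlen1 : (pvSplitRun (v :: xs)).1.length = 1
            ↔ v = (pvSplitRun (v :: xs)).1.getLastD 0 := by
          rw [hlast]
          constructor
          · intro h; rw [h]; push_cast; ring
          · intro h
            have hpos : 1 ≤ (pvSplitRun (v :: xs)).1.length := by rw [ht]; simp
            omega
        unfold pvFmtRun
        by_cases hc : (pvSplitRun (v :: xs)).1.length = 1
        · rw [if_pos hc, if_pos (hlen1.mp hc), h0]
        · rw [if_neg hc, if_neg (fun h => hc (hlen1.mpr h)), h0, hm1]
      by_cases hr : (pvSplitRun (v :: xs)).2 = []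
      · rw [dif_pos hr, hhead]
        rw [show pvRuns (v :: xs) = pvRunsFrom v v xs from rfl, hruns, hr]
        simp [pvRuns, pv_join_singleton]
      · rw [dif_neg hr]
        have hlt := pvSplitRun_snd_lt (v :: xs) hr
        have hrec := ih ((pvSplitRun (v :: xs)).2) hr
          (by simp only [List.length_cons] at hlt hn; omega)
        rw [hrec, hhead, show pvRuns (v :: xs) = pvRunsFrom v v xs from rfl, hruns]
        cases hrest : (pvSplitRun (v :: xs)).2 with
        | nil => exact absurd hrest hr
        | cons w ws =>
          cases hruns2 : pvRuns (w :: ws) with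
          | nil => exact absurd hruns2 (pvRunsFrom_ne_nil ws w w)
          | cons q qs =>
            simp only [List.map_cons]
            rw [pv_join_cons_cons]

-- ===== VERDICT (by name: the statement is the Claim_ definition above) =====
theorem format_years_py_spec : Claim_equal_format_years_py := by
  intro years _ _
  unfold Spec_format_years_py format_years_py format_years_py_alt
  match years with
  | [] => rfl
  | y0 :: rest =>
    by_cases hr : rest = []
    · simp [hr]
    · simp only [if_neg hr]
      split
      · rfl
      · have hA := pv_loopA
          (((y0 :: rest).map (fun y => (PySem.Int.ofStr? y).getD 0)).tail)
          [] (PySem.List.pyGetD ((y0 :: rest).map (fun y => (PySem.Int.ofStr? y).getD 0)) 0 0)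
          (PySem.List.pyGetD ((y0 :: rest).map (fun y => (PySem.Int.ofStr? y).getD 0)) 0 0)
        have hB := pv_fmt_spec ((y0 :: rest).map (fun y => (PySem.Int.ofStr? y).getD 0)).length
          ((y0 :: rest).map (fun y => (PySem.Int.ofStr? y).getD 0)) (by simp) le_rfl
        simp only [List.map_cons, List.tail_cons, PySem.List.pyGetD_zero_cons] at hA hB ⊢
        rw [hB, hA]
        simp [pvRuns]
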